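-- pv_equiv track=rewrite | github.com/Mathwebb/Sorting-Algorithms | algoritmos/heap_sort.py | reconstroi_heap_max
-- ===== SOURCE A (Python) =====
-- def filho_esquerda(indice):
--     indice += 1
--     return indice*2-1
--
-- def filho_direita(indice):
--     indice += 1
--     return indice*2
--
-- def troca(vet, x, y):
--     temp = vet[x]
--     vet[x] = vet[y]
--     vet[y] = temp
--
-- def reconstroi_heap_max(vetor, i, f, cont):
--     if i > len(vetor) // 2 - 1:
--         return vetor, cont+1
--
--     maior = i
--     pai = vetor[i]
--     cont += 3
--     if (i + 1) * 2 - 1 < len(vetor):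
--         cont += 1
--         if vetor[filho_esquerda(i)] > vetor[maior] and filho_esquerda(i) < f:
--             maior = filho_esquerda(i)
--     if (i + 1) * 2 < len(vetor):
--         cont += 1
--         if vetor[filho_direita(i)] > vetor[maior] and filho_direita(i) < f:
--             maior = filho_direita(i)
--     if maior != i:
--         troca(vetor, i, maior)
--         vetor, cont = reconstroi_heap_max(vetor, maior, f, cont)
--     return vetor, cont
-- ===== SOURCE B (Python) =====
-- def reconstroi_heap_max(vetor, i, f, cont):
--     # Iterative sift-down: same return value and comparison count as the
--     # recursive original; mutates vetor in place like the original.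
--     n = len(vetor)
--     while True:
--         if i > n // 2 - 1:
--             return vetor, cont + 1
--         cont += 3
--         maior = i
--         e = 2 * i + 1
--         d = 2 * i + 2
--         if e < n:
--             cont += 1
--             if vetor[e] > vetor[maior] and e < f:
--                 maior = e
--         if d < n:
--             cont += 1
--             if vetor[d] > vetor[maior] and d < f:
--                 maior = d
--         if maior == i:
--             return vetor, cont
--         vetor[i], vetor[maior] = vetor[maior], vetor[i]
--         i = maior
-- ===== Notes on version B (the rewrite author's own statement) =====
-- stated objective: simpler
-- what changed: Replaces the recursive sift-down (helper calls filho_esquerda/filho_direita/troca and a recursive tail call) by a single iterative while-loop that keeps the current index in a variable and swaps in place, with identical comparison counting.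
-- outside the precondition, e.g. on reconstroi_heap_max([3, 1, 2], -1, 3, 0): A returns ([3, 1, 2], 11), B returns ([3, 1, 2], 11)
import Mathlib
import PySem

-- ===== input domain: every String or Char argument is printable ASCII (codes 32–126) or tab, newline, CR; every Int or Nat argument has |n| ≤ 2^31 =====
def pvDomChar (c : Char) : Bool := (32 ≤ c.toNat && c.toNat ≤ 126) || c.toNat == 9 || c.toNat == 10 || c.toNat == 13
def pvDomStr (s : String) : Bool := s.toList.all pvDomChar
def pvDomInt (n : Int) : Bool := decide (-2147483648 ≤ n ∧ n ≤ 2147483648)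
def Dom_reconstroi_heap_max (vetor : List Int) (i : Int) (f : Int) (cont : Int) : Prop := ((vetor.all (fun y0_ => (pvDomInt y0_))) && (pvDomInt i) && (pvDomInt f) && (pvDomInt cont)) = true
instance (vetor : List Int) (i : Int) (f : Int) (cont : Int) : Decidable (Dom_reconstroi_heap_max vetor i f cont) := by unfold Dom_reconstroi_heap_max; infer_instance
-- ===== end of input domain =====

-- B replaces A's recursive sift-down (helper functions + recursive call) by one
-- iterative while-loop over the current index; same return value and counter.
-- Both Pythons mutate vetor in place identically; the equivalence proved here is
-- about the return value.

-- ===== PORT A =====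
def filho_esquerda (indice : Int) : Int := (indice + 1) * 2 - 1

def filho_direita (indice : Int) : Int := (indice + 1) * 2

-- troca(vet, x, y): in-place swap, modelled functionally; indices are in range
-- whenever it is called under Pre_, so pyGetD/pySetD are exact there.
def troca (vet : List Int) (x : Int) (y : Int) : List Int :=
  let temp := PySem.List.pyGetD vet x 0
  let vet' := PySem.List.pySetD vet x (PySem.List.pyGetD vet y 0)
  PySem.List.pySetD vet' y temp

-- Recursion is realised with fuel (vetor.length + 1 is always enough under Pre_:
-- the index strictly increases and recursion only continues while i < len).
def recA : Nat → List Int → Int → Int → Int → List Int × Int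
  | 0, vetor, _, _, cont => (vetor, cont)
  | fuel + 1, vetor, i, f, cont =>
    if i > PySem.Int.floordiv (vetor.length : Int) 2 - 1 then (vetor, cont + 1)
    else
      let maior := i
      let _pai := PySem.List.pyGetD vetor i 0
      let cont := cont + 3
      let (cont, maior) :=
        if (i + 1) * 2 - 1 < (vetor.length : Int) then
          (cont + 1,
           if PySem.List.pyGetD vetor (filho_esquerda i) 0 > PySem.List.pyGetD vetor maior 0 ∧ filho_esquerda i < f
           then filho_esquerda i else maior)
        else (cont, maior)
      let (cont, maior) :=
        if (i + 1) * 2 < (vetor.length : Int) then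
          (cont + 1,
           if PySem.List.pyGetD vetor (filho_direita i) 0 > PySem.List.pyGetD vetor maior 0 ∧ filho_direita i < f
           then filho_direita i else maior)
        else (cont, maior)
      if maior ≠ i then recA fuel (troca vetor i maior) maior f cont
      else (vetor, cont)

def reconstroi_heap_max (vetor : List Int) (i : Int) (f : Int) (cont : Int) : List Int × Int :=
  recA (vetor.length + 1) vetor i f cont

-- ===== PORT B =====
-- The while-True loop of Source B, as a tail-recursive function with the same fuel.
def loopB : Nat → List Int → Int → Int → Int → List Int × Int
  | 0, vetor, _, _, cont => (vetor, cont)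
  | fuel + 1, vetor, i, f, cont =>
    let n : Int := vetor.length
    if i > PySem.Int.floordiv n 2 - 1 then (vetor, cont + 1)
    else
      let cont := cont + 3
      let maior := i
      let e := 2 * i + 1
      let d := 2 * i + 2
      let (cont, maior) :=
        if e < n then
          (cont + 1,
           if PySem.List.pyGetD vetor e 0 > PySem.List.pyGetD vetor maior 0 ∧ e < f then e else maior)
        else (cont, maior)
      let (cont, maior) :=
        if d < n then
          (cont + 1,
           if PySem.List.pyGetD vetor d 0 > PySem.List.pyGetD vetor maior 0 ∧ d < f then d else maior)
        else (cont, maior)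
      if maior = i then (vetor, cont)
      else
        -- vetor[i], vetor[maior] = vetor[maior], vetor[i]
        let vetor' := PySem.List.pySetD (PySem.List.pySetD vetor i (PySem.List.pyGetD vetor maior 0)) maior (PySem.List.pyGetD vetor i 0)
        loopB fuel vetor' maior f cont

def reconstroi_heap_max_alt (vetor : List Int) (i : Int) (f : Int) (cont : Int) : List Int × Int :=
  loopB (vetor.length + 1) vetor i f cont

-- ===== PRECONDITION & SPEC =====
-- Pre_ restricts to the natural heapify domain 0 ≤ i: for negative i the Python A
-- either raises IndexError (index below -len) or returns a value only through
-- accidental negative-index wraparound.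
def Pre_reconstroi_heap_max (vetor : List Int) (i : Int) (f : Int) (cont : Int) : Prop := 0 ≤ i
instance (vetor : List Int) (i : Int) (f : Int) (cont : Int) : Decidable (Pre_reconstroi_heap_max vetor i f cont) := by unfold Pre_reconstroi_heap_max; infer_instance

def pvWitness_reconstroi_heap_max : List Int × Int × Int × Int := ([1, 5, 3], 0, 3, 0)

def Spec_reconstroi_heap_max (vetor : List Int) (i : Int) (f : Int) (cont : Int) (out : List Int × Int) : Prop := out = reconstroi_heap_max_alt vetor i f cont
instance (vetor : List Int) (i : Int) (f : Int) (cont : Int) (out : List Int × Int) : Decidable (Spec_reconstroi_heap_max vetor i f cont out) := by unfold Spec_reconstroi_heap_max; infer_instance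

-- ===== CLAIM (what is proved, stated in full; the proofs are below) =====
def Claim_equal_reconstroi_heap_max : Prop := ∀ (vetor : List Int) (i : Int) (f : Int) (cont : Int), Dom_reconstroi_heap_max vetor i f cont → Pre_reconstroi_heap_max vetor i f cont → Spec_reconstroi_heap_max vetor i f cont (reconstroi_heap_max vetor i f cont)

-- ===== LEMMAS AND PROOFS =====
-- The two transliterations agree step for step (for every fuel, hence at the
-- common fuel vetor.length + 1): the child indices (i+1)*2-1 / (i+1)*2 of A equal
-- B's 2*i+1 / 2*i+2, the counter updates coincide, and A's swap helper builds the
-- same list as B's tuple swap.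
theorem recA_eq_loopB (fuel : Nat) (vetor : List Int) (i f cont : Int) :
    recA fuel vetor i f cont = loopB fuel vetor i f cont := by
  induction fuel generalizing vetor i cont with
  | zero => rfl
  | succ n ih =>
    simp only [recA, loopB, troca, filho_esquerda, filho_direita]
    have he : (i + 1) * 2 - 1 = 2 * i + 1 := by ring
    have hd : (i + 1) * 2 = 2 * i + 2 := by ring
    rw [he, hd]
    split_ifs <;> simp_all [ih]

-- ===== VERDICT (by name: the statement is the Claim_ definition above) =====
theorem reconstroi_heap_max_spec : Claim_equal_reconstroi_heap_max := by
  intro vetor i f cont _ _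
  unfold Spec_reconstroi_heap_max reconstroi_heap_max reconstroi_heap_max_alt
  exact recA_eq_loopB _ vetor i f cont
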